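-- pv_equiv track=rewrite | github.com/imarsh-splunk/enrichment | scripts/preprocessor/phishing_preprocess_2_1.py | exclude_artifacts
-- ===== SOURCE A (Python) =====
-- args_exclude_invalid_artifacts = False
--
-- args_exclude_whitelisted_artifacts = False
--
-- def exclude_artifacts(artifacts):
--     new_artifacts = []
--     for a in artifacts:
--         name = a.get('name')
--         if name not in ["Original Artifacts",
--                 "Invalid URL Artifact", "Invalid Domain Artifact",
--                 "Whitelisted URL Artifact", "Whitelisted Domain Artifact",
--                 "URL Artifact", "Domain Artifact"]:
--             continue
--         if args_exclude_invalid_artifacts: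
--             if name in ["Invalid URL Artifact", "Invalid Domain Artifact"]:
--                 continue
--         if args_exclude_whitelisted_artifacts:
--             if name in ["Whitelisted URL Artifact", "Whitelisted Domain Artifact"]:
--                 continue
--         new_artifacts.append(a)
--     return new_artifacts
-- ===== SOURCE B (Python) =====
-- args_exclude_invalid_artifacts = False
--
-- args_exclude_whitelisted_artifacts = False
--
-- def _keep_name(name):
--     # Decide by parsing the name's structure instead of table lookups:
--     # a kept name is "Original Artifacts", or "<prefix>URL Artifact" /
--     # "<prefix>Domain Artifact" with prefix "", "Invalid " or "Whitelisted "
--     # (the latter two subject to the exclusion flags).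
--     if name == "Original Artifacts":
--         return True
--     if not isinstance(name, str):
--         return False
--     for suf in ("URL Artifact", "Domain Artifact"):
--         if name.endswith(suf):
--             prefix = name[:-len(suf)]
--             if prefix == "":
--                 return True
--             if prefix == "Invalid ":
--                 return not args_exclude_invalid_artifacts
--             if prefix == "Whitelisted ":
--                 return not args_exclude_whitelisted_artifacts
--     return False
--
-- def exclude_artifacts(artifacts):
--     return [a for a in artifacts if _keep_name(a.get('name'))]
-- ===== Notes on version B (the rewrite author's own statement) =====
-- stated objective: alternative
-- what changed: B keeps no table of the seven full artifact names: it decides each artifact by parsing the name's structure (suffix 'URL Artifact'/'Domain Artifact' plus prefix '', 'Invalid ' or 'Whitelisted ', or the literal 'Original Artifacts'), the flag checks moving to the prefix cases, then filters in one pass.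
import Mathlib
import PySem

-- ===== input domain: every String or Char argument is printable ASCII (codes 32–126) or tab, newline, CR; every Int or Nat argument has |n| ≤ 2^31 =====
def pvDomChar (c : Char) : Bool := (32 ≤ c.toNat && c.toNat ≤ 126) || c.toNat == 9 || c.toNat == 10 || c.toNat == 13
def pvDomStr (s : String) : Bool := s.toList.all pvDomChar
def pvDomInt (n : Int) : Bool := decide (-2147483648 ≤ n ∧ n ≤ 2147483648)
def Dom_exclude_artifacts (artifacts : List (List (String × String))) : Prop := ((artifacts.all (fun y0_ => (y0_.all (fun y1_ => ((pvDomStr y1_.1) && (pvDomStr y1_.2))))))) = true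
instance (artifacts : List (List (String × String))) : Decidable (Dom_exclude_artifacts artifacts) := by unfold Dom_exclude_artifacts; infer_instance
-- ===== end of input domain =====

-- B keeps no table of the seven full names: it parses each name's structure (suffix
-- "URL Artifact"/"Domain Artifact" plus prefix "", "Invalid " or "Whitelisted ", or the
-- literal "Original Artifacts") and filters in one pass (objective: alternative).

-- ===== PORT A =====
def args_exclude_invalid_artifacts : Bool := false

def args_exclude_whitelisted_artifacts : Bool := false

-- a.get('name') on an assoc-list dict: first match (exact for Python dicts, which have unique keys)
def pvDictGet (a : List (String × String)) (k : String) : Option String :=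
  (a.find? (fun p => p.1 == k)).map (·.2)

def exclude_artifacts (artifacts : List (List (String × String))) : List (List (String × String)) :=
  artifacts.foldl (fun new_artifacts a =>
    let name := pvDictGet a "name"
    if ¬ (([ "Original Artifacts",
        "Invalid URL Artifact", "Invalid Domain Artifact",
        "Whitelisted URL Artifact", "Whitelisted Domain Artifact",
        "URL Artifact", "Domain Artifact"].map some).contains name) then
      new_artifacts
    else if args_exclude_invalid_artifacts &&
        (([ "Invalid URL Artifact", "Invalid Domain Artifact"].map some).contains name) then
      new_artifacts
    else if args_exclude_whitelisted_artifacts &&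
        (([ "Whitelisted URL Artifact", "Whitelisted Domain Artifact"].map some).contains name) then
      new_artifacts
    else new_artifacts ++ [a]) []

-- ===== PORT B =====
-- the 'for suf in (...)' loop of _keep_name, recursion over the remaining suffixes
def pvKeepGo (n : String) : List String → Bool
  | [] => false
  | suf :: rest =>
    if PySem.Str.endswith n suf then
      let pfx := PySem.Str.slice n none (some (-(PySem.Str.len suf)))   -- name[:-len(suf)]
      if pfx == "" then true
      else if pfx == "Invalid " then !args_exclude_invalid_artifacts
      else if pfx == "Whitelisted " then !args_exclude_whitelisted_artifacts
      else pvKeepGo n rest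
    else pvKeepGo n rest

def pvKeepName (name : Option String) : Bool :=
  match name with
  | some n =>
    if n == "Original Artifacts" then true
    else pvKeepGo n ["URL Artifact", "Domain Artifact"]
  | none => false        -- 'not isinstance(name, str)' (name is None)

def exclude_artifacts_alt (artifacts : List (List (String × String))) : List (List (String × String)) :=
  artifacts.filter (fun a => pvKeepName (pvDictGet a "name"))

-- ===== PRECONDITION & SPEC =====
def Spec_exclude_artifacts (artifacts : List (List (String × String))) (out : List (List (String × String))) : Prop := out = exclude_artifacts_alt artifacts
instance (artifacts : List (List (String × String))) (out : List (List (String × String))) : Decidable (Spec_exclude_artifacts artifacts out) := by unfold Spec_exclude_artifacts; infer_instance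

-- ===== CLAIM (what is proved, stated in full; the proofs are below) =====
def Claim_equal_exclude_artifacts : Prop := ∀ (artifacts : List (List (String × String))), Dom_exclude_artifacts artifacts → Spec_exclude_artifacts artifacts (exclude_artifacts artifacts)

-- ===== LEMMAS AND PROOFS =====

-- name[:-len(suf)] recovers the prefix when suf is a (nonempty) suffix of the name
theorem slice_drop_suffix (n suf : String) (p : List Char)
    (h : n.toList = p ++ suf.toList) (hL : 0 < suf.toList.length) :
    (PySem.Str.slice n none (some (-(PySem.Str.len suf)))).toList = p := by
  have hlen : PySem.Str.len suf = ((suf.toList.length : Nat) : Int) := by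
    simp [PySem.Str.len_eq]
  rw [PySem.Str.toList_slice, PySem.Chars.slice_eq_listSlice, hlen,
    PySem.List.slice_to_neg_natCast _ _ hL, h]
  simp

-- B's keep test agrees with membership in A's seven-name table
theorem keep_eq (n : String) :
    pvKeepName (some n)
      = ([ "Original Artifacts",
           "Invalid URL Artifact", "Invalid Domain Artifact",
           "Whitelisted URL Artifact", "Whitelisted Domain Artifact",
           "URL Artifact", "Domain Artifact"] : List String).contains n := by
  by_cases hm : n ∈ ([ "Original Artifacts",
      "Invalid URL Artifact", "Invalid Domain Artifact",
      "Whitelisted URL Artifact", "Whitelisted Domain Artifact",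
      "URL Artifact", "Domain Artifact"] : List String)
  · simp only [List.mem_cons, List.not_mem_nil, or_false] at hm
    rcases hm with h|h|h|h|h|h|h <;> subst h <;> decide
  · have hc : ([ "Original Artifacts",
        "Invalid URL Artifact", "Invalid Domain Artifact",
        "Whitelisted URL Artifact", "Whitelisted Domain Artifact",
        "URL Artifact", "Domain Artifact"] : List String).contains n = false := by
      simpa using hm
    rw [hc]
    have hne : ∀ s ∈ ([ "Original Artifacts",
        "Invalid URL Artifact", "Invalid Domain Artifact",
        "Whitelisted URL Artifact", "Whitelisted Domain Artifact",
        "URL Artifact", "Domain Artifact"] : List String), n ≠ s := by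
      intro s hs he; exact hm (he ▸ hs)
    have h0 : (n == "Original Artifacts") = false :=
      beq_eq_false_iff_ne.mpr (hne "Original Artifacts" (by simp))
    simp only [pvKeepName, pvKeepGo]
    rw [h0]
    simp only [Bool.false_eq_true, if_false]
    by_cases h1 : PySem.Str.endswith n "URL Artifact" = true
    · -- n = pfx ++ "URL Artifact"
      have hsuf : ("URL Artifact".toList) <:+ n.toList := by
        have := (PySem.Chars.endswith_iff n.toList ("URL Artifact".toList)).mp
        simp only [PySem.Str.endswith_eq] at h1
        exact this h1
      obtain ⟨p, hp⟩ := hsuf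
      have hpfx : (PySem.Str.slice n none (some (-(PySem.Str.len "URL Artifact")))).toList = p :=
        slice_drop_suffix n _ p hp.symm (by decide)
      rw [h1]
      simp only [if_true]
      have hn : n = String.ofList (p ++ "URL Artifact".toList) := by
        rw [hp, String.ofList_toList]
      by_cases hp0 : p = []
      · exact absurd (by rw [hn, hp0]; decide) (hne "URL Artifact" (by simp))
      · by_cases hpI : p = "Invalid ".toList
        · exact absurd (by rw [hn, hpI]; decide) (hne "Invalid URL Artifact" (by simp))
        · by_cases hpW : p = "Whitelisted ".toList
          · exact absurd (by rw [hn, hpW]; decide) (hne "Whitelisted URL Artifact" (by simp))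
          · have e0 : (PySem.Str.slice n none (some (-(PySem.Str.len "URL Artifact"))) == "") = false := by
              apply beq_eq_false_iff_ne.mpr
              intro he; apply hp0; rw [← hpfx, he]; rfl
            have eI : (PySem.Str.slice n none (some (-(PySem.Str.len "URL Artifact"))) == "Invalid ") = false := by
              apply beq_eq_false_iff_ne.mpr
              intro he; apply hpI; rw [← hpfx, he]
            have eW : (PySem.Str.slice n none (some (-(PySem.Str.len "URL Artifact"))) == "Whitelisted ") = false := by
              apply beq_eq_false_iff_ne.mpr
              intro he; apply hpW; rw [← hpfx, he]
            rw [e0, eI, eW]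
            simp only [Bool.false_eq_true, if_false]
            -- a string ending in "URL Artifact" does not end in "Domain Artifact"
            have h2 : PySem.Str.endswith n "Domain Artifact" = false := by
              apply Bool.eq_false_iff.mpr
              intro h2
              have hsuf2 : ("Domain Artifact".toList) <:+ n.toList := by
                have := (PySem.Chars.endswith_iff n.toList ("Domain Artifact".toList)).mp
                simp only [PySem.Str.endswith_eq] at h2
                exact this h2
              obtain ⟨q, hq⟩ := hsuf2
              -- the last 12 characters would have to be both "URL Artifact" and "ain Artifact"
              have h12 : ((p ++ "URL Artifact".toList).reverse).take 12
                  = ((q ++ "Domain Artifact".toList).reverse).take 12 := by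
                rw [hp, hq]
              rw [List.reverse_append, List.reverse_append] at h12
              have hl1 : ("URL Artifact".toList).reverse.length = 12 := by decide
              rw [← hl1, List.take_left] at h12
              have hl2 : (12 : Nat) ≤ ("Domain Artifact".toList).reverse.length := by decide
              rw [hl1, List.take_append_of_le_length hl2] at h12
              exact absurd h12 (by decide)
            rw [h2]
            simp
    · rw [Bool.eq_false_iff.mpr h1]
      simp only [Bool.false_eq_true, if_false]
      by_cases h2 : PySem.Str.endswith n "Domain Artifact" = true
      · have hsuf : ("Domain Artifact".toList) <:+ n.toList := by
          have := (PySem.Chars.endswith_iff n.toList ("Domain Artifact".toList)).mp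
          simp only [PySem.Str.endswith_eq] at h2
          exact this h2
        obtain ⟨p, hp⟩ := hsuf
        have hpfx : (PySem.Str.slice n none (some (-(PySem.Str.len "Domain Artifact")))).toList = p :=
          slice_drop_suffix n _ p hp.symm (by decide)
        rw [h2]
        simp only [if_true]
        have hn : n = String.ofList (p ++ "Domain Artifact".toList) := by
          rw [hp, String.ofList_toList]
        by_cases hp0 : p = []
        · exact absurd (by rw [hn, hp0]; decide) (hne "Domain Artifact" (by simp))
        · by_cases hpI : p = "Invalid ".toList
          · exact absurd (by rw [hn, hpI]; decide) (hne "Invalid Domain Artifact" (by simp))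
          · by_cases hpW : p = "Whitelisted ".toList
            · exact absurd (by rw [hn, hpW]; decide) (hne "Whitelisted Domain Artifact" (by simp))
            · have e0 : (PySem.Str.slice n none (some (-(PySem.Str.len "Domain Artifact"))) == "") = false := by
                apply beq_eq_false_iff_ne.mpr
                intro he; apply hp0; rw [← hpfx, he]; rfl
              have eI : (PySem.Str.slice n none (some (-(PySem.Str.len "Domain Artifact"))) == "Invalid ") = false := by
                apply beq_eq_false_iff_ne.mpr
                intro he; apply hpI; rw [← hpfx, he]
              have eW : (PySem.Str.slice n none (some (-(PySem.Str.len "Domain Artifact"))) == "Whitelisted ") = false := by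
                apply beq_eq_false_iff_ne.mpr
                intro he; apply hpW; rw [← hpfx, he]
              rw [e0, eI, eW]
              simp
      · rw [Bool.eq_false_iff.mpr h2]
        simp

-- A's per-item branch chain collapses to B's keep test
theorem body_eq (acc : List (List (String × String))) (a : List (String × String)) :
    (let name := pvDictGet a "name"
     if ¬ (([ "Original Artifacts",
        "Invalid URL Artifact", "Invalid Domain Artifact",
        "Whitelisted URL Artifact", "Whitelisted Domain Artifact",
        "URL Artifact", "Domain Artifact"].map some).contains name) then
      acc
    else if args_exclude_invalid_artifacts &&
        (([ "Invalid URL Artifact", "Invalid Domain Artifact"].map some).contains name) then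
      acc
    else if args_exclude_whitelisted_artifacts &&
        (([ "Whitelisted URL Artifact", "Whitelisted Domain Artifact"].map some).contains name) then
      acc
    else acc ++ [a])
    = if pvKeepName (pvDictGet a "name") then acc ++ [a] else acc := by
  cases h : pvDictGet a "name" with
  | none => simp [pvKeepName]
  | some n =>
    simp only [args_exclude_invalid_artifacts, args_exclude_whitelisted_artifacts,
      Bool.false_and, Bool.false_eq_true, if_false, keep_eq n]
    have : (([ "Original Artifacts",
        "Invalid URL Artifact", "Invalid Domain Artifact",
        "Whitelisted URL Artifact", "Whitelisted Domain Artifact",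
        "URL Artifact", "Domain Artifact"].map some).contains (some n))
        = ([ "Original Artifacts",
        "Invalid URL Artifact", "Invalid Domain Artifact",
        "Whitelisted URL Artifact", "Whitelisted Domain Artifact",
        "URL Artifact", "Domain Artifact"] : List String).contains n := by
      simp
    rw [this]
    split_ifs <;> simp_all

-- ===== VERDICT (by name: the statement is the Claim_ definition above) =====
theorem exclude_artifacts_spec : Claim_equal_exclude_artifacts := by
  intro artifacts _
  unfold Spec_exclude_artifacts exclude_artifacts exclude_artifacts_alt
  have hf : (fun (new_artifacts : List (List (String × String))) (a : List (String × String)) =>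
      let name := pvDictGet a "name"
      if ¬ (([ "Original Artifacts",
          "Invalid URL Artifact", "Invalid Domain Artifact",
          "Whitelisted URL Artifact", "Whitelisted Domain Artifact",
          "URL Artifact", "Domain Artifact"].map some).contains name) then
        new_artifacts
      else if args_exclude_invalid_artifacts &&
          (([ "Invalid URL Artifact", "Invalid Domain Artifact"].map some).contains name) then
        new_artifacts
      else if args_exclude_whitelisted_artifacts &&
          (([ "Whitelisted URL Artifact", "Whitelisted Domain Artifact"].map some).contains name) then
        new_artifacts
      else new_artifacts ++ [a])
      = (fun acc a => if pvKeepName (pvDictGet a "name") then acc ++ [a] else acc) :=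
    funext fun acc => funext fun a => body_eq acc a
  rw [hf, PySem.List.foldl_append_if_eq_filter]
  rfl
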